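-- pv_equiv track=rewrite | github.com/rrrohit1/doc-analysis-agentic | src/prompts.py | get_document_type_prompt
-- ===== SOURCE A (Python) =====
-- RESEARCH_PAPER_PROMPT = """This appears to be a research paper or academic document. When analyzing:
-- - Identify the research question/hypothesis
-- - Summarize methodology and findings
-- - Note limitations and future research directions
-- - Evaluate the significance of contributions"""
--
-- BUSINESS_DOCUMENT_PROMPT = """This appears to be a business document. When analyzing:
-- - Extract key business metrics and objectives
-- - Identify strategic initiatives and recommendations
-- - Note financial implications and projections
-- - Summarize action items and next steps"""
--
-- LEGAL_DOCUMENT_PROMPT = """This appears to be a legal document. When analyzing: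
-- - Identify key legal provisions and requirements
-- - Note important dates, parties, and obligations
-- - Highlight potential risks or compliance issues
-- - Summarize main legal implications
-- Note: This is for informational purposes only and not legal advice."""
--
-- TECHNICAL_MANUAL_PROMPT = """This appears to be a technical manual or documentation. When analyzing:
-- - Extract key procedures and instructions
-- - Identify technical specifications and requirements
-- - Note safety considerations and warnings
-- - Summarize operational guidelines and best practices"""
--
-- def get_document_type_prompt(content_preview: str) -> str:
--     """
--     Determine appropriate prompt based on document content.
--
--     Args:
--         content_preview (str): Preview of document content
--
--     Returns:
--         str: Appropriate specialized prompt
--     """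
--     content_lower = content_preview.lower()
--
--     # Check for research paper indicators
--     if any(term in content_lower for term in ['abstract', 'methodology', 'references', 'hypothesis', 'research']):
--         return RESEARCH_PAPER_PROMPT
--
--     # Check for business document indicators
--     elif any(term in content_lower for term in ['revenue', 'profit', 'strategy', 'market', 'business plan']):
--         return BUSINESS_DOCUMENT_PROMPT
--
--     # Check for legal document indicators
--     elif any(term in content_lower for term in ['contract', 'agreement', 'legal', 'clause', 'terms']):
--         return LEGAL_DOCUMENT_PROMPT
--
--     # Check for technical manual indicators
--     elif any(term in content_lower for term in ['procedure', 'manual', 'installation', 'configuration', 'technical']):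
--         return TECHNICAL_MANUAL_PROMPT
--
--     # Default to general analysis
--     return ""
-- ===== SOURCE B (Python) =====
-- RESEARCH_PAPER_PROMPT = """This appears to be a research paper or academic document. When analyzing:
-- - Identify the research question/hypothesis
-- - Summarize methodology and findings
-- - Note limitations and future research directions
-- - Evaluate the significance of contributions"""
--
-- BUSINESS_DOCUMENT_PROMPT = """This appears to be a business document. When analyzing:
-- - Extract key business metrics and objectives
-- - Identify strategic initiatives and recommendations
-- - Note financial implications and projections
-- - Summarize action items and next steps"""
--
-- LEGAL_DOCUMENT_PROMPT = """This appears to be a legal document. When analyzing: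
-- - Identify key legal provisions and requirements
-- - Note important dates, parties, and obligations
-- - Highlight potential risks or compliance issues
-- - Summarize main legal implications
-- Note: This is for informational purposes only and not legal advice."""
--
-- TECHNICAL_MANUAL_PROMPT = """This appears to be a technical manual or documentation. When analyzing:
-- - Extract key procedures and instructions
-- - Identify technical specifications and requirements
-- - Note safety considerations and warnings
-- - Summarize operational guidelines and best practices"""
--
-- # Prompts indexed by priority rank (0 = highest priority).
-- _PROMPTS = [RESEARCH_PAPER_PROMPT, BUSINESS_DOCUMENT_PROMPT,
--             LEGAL_DOCUMENT_PROMPT, TECHNICAL_MANUAL_PROMPT]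
--
-- # Flat keyword -> priority-rank index (all 20 keywords are distinct).
-- _KEYWORD_RANK = {
--     'abstract': 0, 'methodology': 0, 'references': 0, 'hypothesis': 0, 'research': 0,
--     'revenue': 1, 'profit': 1, 'strategy': 1, 'market': 1, 'business plan': 1,
--     'contract': 2, 'agreement': 2, 'legal': 2, 'clause': 2, 'terms': 2,
--     'procedure': 3, 'manual': 3, 'installation': 3, 'configuration': 3, 'technical': 3,
-- }
--
-- def get_document_type_prompt(content_preview: str) -> str:
--     """Rank-minimisation over a flat keyword index: the first matching
--     if/elif branch of the original is exactly the minimal-rank keyword hit."""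
--     content_lower = content_preview.lower()
--     best = min((rank for kw, rank in _KEYWORD_RANK.items() if kw in content_lower),
--                default=len(_PROMPTS))
--     return (_PROMPTS + [""])[best]
-- ===== Notes on version B (the rewrite author's own statement) =====
-- stated objective: alternative
-- what changed: Replaces the four short-circuit if/elif any(...) branches by a single flat keyword->rank index scanned once, taking the minimum matched rank and indexing into a prompt table (first matching branch = minimal-rank keyword hit).
import Mathlib
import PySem

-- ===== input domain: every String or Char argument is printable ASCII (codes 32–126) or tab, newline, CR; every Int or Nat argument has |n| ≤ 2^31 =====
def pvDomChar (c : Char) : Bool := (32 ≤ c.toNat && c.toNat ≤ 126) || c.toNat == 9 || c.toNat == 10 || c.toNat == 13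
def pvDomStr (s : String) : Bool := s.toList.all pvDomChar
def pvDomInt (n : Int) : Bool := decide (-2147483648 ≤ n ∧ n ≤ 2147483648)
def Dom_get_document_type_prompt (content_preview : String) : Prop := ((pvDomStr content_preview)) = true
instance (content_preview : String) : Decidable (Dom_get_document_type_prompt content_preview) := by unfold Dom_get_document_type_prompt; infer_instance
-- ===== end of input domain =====

-- B replaces A's if/elif chain by a min-rank scan over one flat keyword->rank index and a table lookup; objective: alternative.

def pvRESEARCH_PAPER_PROMPT : String := "This appears to be a research paper or academic document. When analyzing:\n- Identify the research question/hypothesis\n- Summarize methodology and findings  \n- Note limitations and future research directions\n- Evaluate the significance of contributions"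

def pvBUSINESS_DOCUMENT_PROMPT : String := "This appears to be a business document. When analyzing:\n- Extract key business metrics and objectives\n- Identify strategic initiatives and recommendations\n- Note financial implications and projections\n- Summarize action items and next steps"

def pvLEGAL_DOCUMENT_PROMPT : String := "This appears to be a legal document. When analyzing:\n- Identify key legal provisions and requirements\n- Note important dates, parties, and obligations\n- Highlight potential risks or compliance issues\n- Summarize main legal implications\nNote: This is for informational purposes only and not legal advice."

def pvTECHNICAL_MANUAL_PROMPT : String := "This appears to be a technical manual or documentation. When analyzing:\n- Extract key procedures and instructions\n- Identify technical specifications and requirements\n- Note safety considerations and warnings\n- Summarize operational guidelines and best practices"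

-- ===== PORT A =====
-- literal transliteration of A's if/elif chain
def get_document_type_prompt (content_preview : String) : String :=
  let content_lower := PySem.Str.lower content_preview
  if ["abstract", "methodology", "references", "hypothesis", "research"].any
      (fun term => PySem.Str.isIn term content_lower) then pvRESEARCH_PAPER_PROMPT
  else if ["revenue", "profit", "strategy", "market", "business plan"].any
      (fun term => PySem.Str.isIn term content_lower) then pvBUSINESS_DOCUMENT_PROMPT
  else if ["contract", "agreement", "legal", "clause", "terms"].any
      (fun term => PySem.Str.isIn term content_lower) then pvLEGAL_DOCUMENT_PROMPT
  else if ["procedure", "manual", "installation", "configuration", "technical"].any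
      (fun term => PySem.Str.isIn term content_lower) then pvTECHNICAL_MANUAL_PROMPT
  else ""

-- ===== PORT B =====
-- B's prompt table indexed by priority rank
def pvPrompts : List String :=
  [pvRESEARCH_PAPER_PROMPT, pvBUSINESS_DOCUMENT_PROMPT, pvLEGAL_DOCUMENT_PROMPT, pvTECHNICAL_MANUAL_PROMPT]

-- B's flat keyword -> rank index (dict of Source B, in insertion order)
def pvKeywordRank : List (String × Nat) :=
  [("abstract", 0), ("methodology", 0), ("references", 0), ("hypothesis", 0), ("research", 0),
   ("revenue", 1), ("profit", 1), ("strategy", 1), ("market", 1), ("business plan", 1),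
   ("contract", 2), ("agreement", 2), ("legal", 2), ("clause", 2), ("terms", 2),
   ("procedure", 3), ("manual", 3), ("installation", 3), ("configuration", 3), ("technical", 3)]

-- min over the matched ranks with default = pvPrompts.length (Python's min(gen, default=...))
def get_document_type_prompt_alt (content_preview : String) : String :=
  let content_lower := PySem.Str.lower content_preview
  let best := pvKeywordRank.foldl
    (fun acc kr => if PySem.Str.isIn kr.1 content_lower then min acc kr.2 else acc)
    pvPrompts.length
  (pvPrompts ++ [""]).getD best ""

-- ===== PRECONDITION & SPEC =====
def Spec_get_document_type_prompt (content_preview : String) (out : String) : Prop := out = get_document_type_prompt_alt content_preview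
instance (content_preview : String) (out : String) : Decidable (Spec_get_document_type_prompt content_preview out) := by unfold Spec_get_document_type_prompt; infer_instance

-- ===== CLAIM =====
def Claim_equal_get_document_type_prompt : Prop := ∀ (content_preview : String), Dom_get_document_type_prompt content_preview → Spec_get_document_type_prompt content_preview (get_document_type_prompt content_preview)

-- ===== LEMMAS AND PROOFS =====

-- folding a constant-rank keyword group updates the accumulator to min acc r iff any keyword matches
lemma pv_fold_group (cl : String) (r : Nat) (g : List String) (acc : Nat) :
    (g.map (fun kw => (kw, r))).foldl
      (fun acc kr => if PySem.Str.isIn kr.1 cl then min acc kr.2 else acc) acc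
    = if g.any (fun kw => PySem.Str.isIn kw cl) then min acc r else acc := by
  induction g generalizing acc with
  | nil => simp
  | cons k t ih =>
      simp only [List.map_cons, List.foldl_cons, List.any_cons, ih]
      rcases Bool.eq_false_or_eq_true (PySem.Str.isIn k cl) with h | h <;>
      rcases Bool.eq_false_or_eq_true (t.any fun kw => PySem.Str.isIn kw cl) with h2 | h2 <;>
      simp only [h, h2] <;> simp

-- ===== VERDICT =====
theorem get_document_type_prompt_spec : Claim_equal_get_document_type_prompt := by
  intro s _
  show get_document_type_prompt s = get_document_type_prompt_alt s
  simp only [get_document_type_prompt, get_document_type_prompt_alt]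
  have hsplit : pvKeywordRank =
      (["abstract", "methodology", "references", "hypothesis", "research"].map (fun kw => (kw, 0))) ++
      ((["revenue", "profit", "strategy", "market", "business plan"].map (fun kw => (kw, 1))) ++
      ((["contract", "agreement", "legal", "clause", "terms"].map (fun kw => (kw, 2))) ++
      (["procedure", "manual", "installation", "configuration", "technical"].map (fun kw => (kw, 3))))) := rfl
  rw [hsplit]
  simp only [List.foldl_append, pv_fold_group]
  rcases Bool.eq_false_or_eq_true (["abstract", "methodology", "references", "hypothesis", "research"].any
      (fun kw => PySem.Str.isIn kw (PySem.Str.lower s))) with e1 | e1 <;>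
  rcases Bool.eq_false_or_eq_true (["revenue", "profit", "strategy", "market", "business plan"].any
      (fun kw => PySem.Str.isIn kw (PySem.Str.lower s))) with e2 | e2 <;>
  rcases Bool.eq_false_or_eq_true (["contract", "agreement", "legal", "clause", "terms"].any
      (fun kw => PySem.Str.isIn kw (PySem.Str.lower s))) with e3 | e3 <;>
  rcases Bool.eq_false_or_eq_true (["procedure", "manual", "installation", "configuration", "technical"].any
      (fun kw => PySem.Str.isIn kw (PySem.Str.lower s))) with e4 | e4 <;>
  simp only [e1, e2, e3, e4] <;> rfl
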